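-- pv_equiv track=rewrite | github.com/jzheng23/Time2Stop-slides | scripts/TOC.py | insert_slide_at_position
-- ===== SOURCE A (Python) =====
-- def insert_slide_at_position(slides, toc_slide, position):
--     count = 0
--     new_slides = []
--     buffer = []
--
--     for line in slides:
--         buffer.append(line)
--         if line.strip() == "---":
--             count += 1
--             if count == position:
--                 new_slides.extend(buffer)
--                 new_slides.append(toc_slide)
--                 buffer = []
--
--     new_slides.extend(buffer)
--     return "\n".join(new_slides)
-- ===== SOURCE B (Python) =====
-- def insert_slide_at_position(slides, toc_slide, position):
--     lines = list(slides)
--     insert_idx = None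
--     count = 0
--     for i, line in enumerate(lines):
--         if line.strip() == "---":
--             count += 1
--             if count == position:
--                 insert_idx = i + 1
--                 break
--     if insert_idx is None:
--         result = lines
--     else:
--         result = lines[:insert_idx] + [toc_slide] + lines[insert_idx:]
--     return "\n".join(result)
-- ===== Notes on version B (the rewrite author's own statement) =====
-- stated objective: simpler
-- what changed: Replaces the running-buffer accumulate-and-flush loop with a locate-then-splice decomposition: one pass finds the index right after the nth '---' separator, then the TOC slide is spliced in with list slicing.
import Mathlib
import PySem

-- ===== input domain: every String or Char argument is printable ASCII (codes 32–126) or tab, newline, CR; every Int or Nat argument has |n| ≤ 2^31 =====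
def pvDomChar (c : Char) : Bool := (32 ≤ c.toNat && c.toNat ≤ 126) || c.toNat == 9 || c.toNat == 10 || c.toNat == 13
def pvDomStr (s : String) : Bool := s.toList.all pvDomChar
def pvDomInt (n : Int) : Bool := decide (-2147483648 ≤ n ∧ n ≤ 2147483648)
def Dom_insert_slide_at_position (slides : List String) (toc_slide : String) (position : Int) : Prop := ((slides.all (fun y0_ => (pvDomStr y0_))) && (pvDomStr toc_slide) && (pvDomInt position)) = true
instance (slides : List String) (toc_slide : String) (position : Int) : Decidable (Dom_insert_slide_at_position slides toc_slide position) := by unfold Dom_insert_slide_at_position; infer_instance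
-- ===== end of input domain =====

-- B replaces A's running-buffer accumulate-and-flush loop by locate-then-splice
-- (find the index after the nth '---' line, then splice the TOC slide in); objective: simpler.

-- ===== PORT A =====
-- A's loop, carrying its three mutable variables (count, new_slides, buffer) as state.
def pvGoA (toc_slide : String) (position : Int) :
    List String → Int → List String → List String → List String
  | [], _, new_slides, buffer => new_slides ++ buffer
  | line :: rest, count, new_slides, buffer =>
    let buffer' := buffer ++ [line]
    if PySem.Str.strip line == "---" then
      let count' := count + 1
      if count' == position then
        pvGoA toc_slide position rest count' (new_slides ++ buffer' ++ [toc_slide]) []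
      else
        pvGoA toc_slide position rest count' new_slides buffer'
    else
      pvGoA toc_slide position rest count new_slides buffer'

def insert_slide_at_position (slides : List String) (toc_slide : String) (position : Int) : String :=
  PySem.Str.join "\n" (pvGoA toc_slide position slides 0 [] [])

-- ===== PORT B =====
-- B's locating loop: index (after the break) of the line following the nth '---', if any.
def pvFindIdx (position : Int) : List String → Nat → Int → Option Nat
  | [], _, _ => none
  | line :: rest, i, count =>
    if PySem.Str.strip line == "---" then
      if count + 1 == position then some (i + 1)
      else pvFindIdx position rest (i + 1) (count + 1)
    else pvFindIdx position rest (i + 1) count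

def insert_slide_at_position_alt (slides : List String) (toc_slide : String) (position : Int) : String :=
  match pvFindIdx position slides 0 0 with
  | none => PySem.Str.join "\n" slides
  | some idx => PySem.Str.join "\n" (slides.take idx ++ [toc_slide] ++ slides.drop idx)

-- ===== PRECONDITION & SPEC =====
def Spec_insert_slide_at_position (slides : List String) (toc_slide : String) (position : Int) (out : String) : Prop := out = insert_slide_at_position_alt slides toc_slide position
instance (slides : List String) (toc_slide : String) (position : Int) (out : String) : Decidable (Spec_insert_slide_at_position slides toc_slide position out) := by unfold Spec_insert_slide_at_position; infer_instance

-- ===== CLAIM (what is proved, stated in full; the proofs are below) =====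
def Claim_equal_insert_slide_at_position : Prop := ∀ (slides : List String) (toc_slide : String) (position : Int), Dom_insert_slide_at_position slides toc_slide position → Spec_insert_slide_at_position slides toc_slide position (insert_slide_at_position slides toc_slide position)

-- ===== LEMMAS AND PROOFS =====

-- Once count has reached position, A's insert branch can never fire again.
theorem pvGoA_done (toc : String) (position : Int) :
    ∀ (l : List String) (count : Int) (acc buffer : List String), position ≤ count →
      pvGoA toc position l count acc buffer = acc ++ buffer ++ l := by
  intro l
  induction l with
  | nil => intro count acc buffer _; simp [pvGoA]
  | cons line rest ih =>
    intro count acc buffer h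
    simp only [pvGoA]
    by_cases hs : PySem.Str.strip line == "---"
    · simp only [hs, if_true]
      have hne : (count + 1 == position) = false := by
        simp only [beq_eq_false_iff_ne, ne_eq]; omega
      rw [hne]
      simp only [Bool.false_eq_true, if_false]
      rw [ih (count + 1) acc (buffer ++ [line]) (by omega)]
      simp
    · simp only [hs, Bool.false_eq_true, if_false]
      rw [ih count acc (buffer ++ [line]) h]
      simp

-- With count already at/above position, B's finder finds nothing either.
theorem pvFindIdx_done (position : Int) :
    ∀ (l : List String) (i : Nat) (count : Int), position ≤ count →
      pvFindIdx position l i count = none := by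
  intro l
  induction l with
  | nil => intro i count _; simp [pvFindIdx]
  | cons line rest ih =>
    intro i count h
    simp only [pvFindIdx]
    by_cases hs : PySem.Str.strip line == "---"
    · simp only [hs, if_true]
      have hne : (count + 1 == position) = false := by
        simp only [beq_eq_false_iff_ne, ne_eq]; omega
      rw [hne]
      simp only [Bool.false_eq_true, if_false]
      exact ih (i + 1) (count + 1) (by omega)
    · simp only [hs, Bool.false_eq_true, if_false]
      exact ih (i + 1) count h

-- The index accumulator only shifts the result.
theorem pvFindIdx_shift (position : Int) :
    ∀ (l : List String) (i : Nat) (count : Int),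
      pvFindIdx position l i count = (pvFindIdx position l 0 count).map (· + i) := by
  intro l
  induction l with
  | nil => intro i count; simp [pvFindIdx]
  | cons line rest ih =>
    intro i count
    simp only [pvFindIdx]
    by_cases hs : PySem.Str.strip line == "---"
    · simp only [hs, if_true]
      by_cases hc : (count + 1 == position)
      · simp [hc, Nat.add_comm]
      · simp only [hc, Bool.false_eq_true, if_false]
        rw [ih (i + 1) (count + 1), ih 1 (count + 1)]
        cases pvFindIdx position rest 0 (count + 1) with
        | none => simp
        | some j => simp [Option.map]; omega
    · simp only [hs, Bool.false_eq_true, if_false]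
      rw [ih (i + 1) count, ih 1 count]
      cases pvFindIdx position rest 0 count with
      | none => simp
      | some j => simp [Option.map]; omega

-- Main invariant: A's loop output = accumulated prefix ++ B's locate-then-splice result.
theorem pvGoA_eq_splice (toc : String) (position : Int) :
    ∀ (l : List String) (count : Int) (acc buffer : List String), count < position →
      pvGoA toc position l count acc buffer =
        acc ++ buffer ++ (match pvFindIdx position l 0 count with
          | none => l
          | some idx => l.take idx ++ [toc] ++ l.drop idx) := by
  intro l
  induction l with
  | nil => intro count acc buffer _; simp [pvGoA, pvFindIdx]
  | cons line rest ih =>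
    intro count acc buffer h
    simp only [pvGoA, pvFindIdx]
    by_cases hs : PySem.Str.strip line == "---"
    · simp only [hs, if_true]
      by_cases hc : (count + 1 == position)
      · have hple : position ≤ count + 1 := by
          have := beq_iff_eq.mp hc; omega
        simp only [hc, if_true]
        rw [pvGoA_done toc position rest (count + 1) _ _ hple]
        simp
      · have hlt : count + 1 < position := by
          have hne : count + 1 ≠ position := fun he => hc (beq_iff_eq.mpr he)
          omega
        simp only [hc, Bool.false_eq_true, if_false]
        rw [ih (count + 1) acc (buffer ++ [line]) hlt,
            pvFindIdx_shift position rest 1 (count + 1)]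
        cases pvFindIdx position rest 0 (count + 1) with
        | none => simp
        | some j => simp
    · simp only [hs, Bool.false_eq_true, if_false]
      rw [ih count acc (buffer ++ [line]) h,
          pvFindIdx_shift position rest 1 count]
      cases pvFindIdx position rest 0 count with
      | none => simp
      | some j => simp

-- ===== VERDICT (by name: the statement is the Claim_ definition above) =====
theorem insert_slide_at_position_spec : Claim_equal_insert_slide_at_position := by
  intro slides toc_slide position _
  unfold Spec_insert_slide_at_position insert_slide_at_position insert_slide_at_position_alt
  by_cases hp : 0 < position
  · rw [pvGoA_eq_splice toc_slide position slides 0 [] [] hp]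
    cases pvFindIdx position slides 0 0 with
    | none => simp
    | some idx => simp
  · rw [pvGoA_done toc_slide position slides 0 [] [] (by omega),
        pvFindIdx_done position slides 0 0 (by omega)]
    simp
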